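-- pv_equiv track=rewrite | github.com/B-Perederei/Scrabble | ps3.py | update_hand
-- ===== SOURCE A (Python) =====
-- def update_hand(hand, word):
--     """
--     Does NOT assume that hand contains every letter in word at least as
--     many times as the letter appears in word. Letters in word that don't
--     appear in hand should be ignored. Letters that appear in word more times
--     than in hand should never result in a negative count; instead, set the
--     count in the returned hand to 0 (or remove the letter from the
--     dictionary, depending on how your code is structured).
--
--     Updates the hand: uses up the letters in the given word
--     and returns the new hand, without those letters in it.
--
--     Has no side effects: does not modify hand.
--
--     word: string
--     hand: dictionary (string -> int)
--     returns: dictionary (string -> int)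
--     """
--     word = word.lower()
--     hand_modified = hand.copy()
--     for letters in word:
--         if letters in hand_modified.keys():
--             hand_modified[letters] -= 1
--     list_keys = list(hand_modified.keys())
--     for keys in list_keys:
--         if hand_modified[keys] <= 0:
--             hand_modified.pop(keys)
--     return hand_modified
-- ===== SOURCE B (Python) =====
-- def update_hand(hand, word):
--     """Same behaviour as A, computed without mutating a copy: count the
--     letters of word once, then build the result in a single dict
--     comprehension keeping only positive leftover counts."""
--     counts = {}
--     for ch in word.lower():
--         counts[ch] = counts.get(ch, 0) + 1
--     return {k: v - counts.get(k, 0) for k, v in hand.items() if v > counts.get(k, 0)}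
-- ===== Notes on version B (the rewrite author's own statement) =====
-- stated objective: idiomatic
-- what changed: A copies the hand dict, mutates it by decrementing per word letter, then does a second removal pass over a snapshot of the keys; B instead builds a letter counter of word.lower() once and produces the result directly with a single dict comprehension (v - count, kept only if positive), with no mutation and no removal pass.
import Mathlib
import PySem

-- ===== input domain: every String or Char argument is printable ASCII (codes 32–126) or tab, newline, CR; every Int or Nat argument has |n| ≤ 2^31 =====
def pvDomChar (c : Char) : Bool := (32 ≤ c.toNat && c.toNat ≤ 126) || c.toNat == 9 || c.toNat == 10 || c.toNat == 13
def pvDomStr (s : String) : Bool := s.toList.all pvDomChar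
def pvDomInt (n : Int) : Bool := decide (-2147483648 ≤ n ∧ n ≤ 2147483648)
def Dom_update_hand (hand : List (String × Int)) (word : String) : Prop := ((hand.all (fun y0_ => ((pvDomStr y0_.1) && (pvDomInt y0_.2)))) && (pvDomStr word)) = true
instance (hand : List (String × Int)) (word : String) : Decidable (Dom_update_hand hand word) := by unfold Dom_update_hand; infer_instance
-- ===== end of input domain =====

-- B replaces A's mutate-and-remove two-loop scheme by a one-shot letter count plus a single
-- dict comprehension (idiomatic, same cost); return value only — neither version mutates hand.

-- ===== PORT A =====
-- A: copy the hand dict, decrement per occurrence of each lower-cased letter present,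
-- then pop every key whose count dropped to ≤ 0 (iterating a snapshot of the keys).
def update_hand (hand : List (String × Int)) (word : String) : List (String × Int) :=
  let w := (PySem.Str.lower word).toList
  let hand_modified := PySem.Dict.ofList hand
  let d1 := w.foldl (fun d letters =>
      if d.contains (String.mk [letters]) then d.modify (String.mk [letters]) 0 (fun v => v - 1)
      else d) hand_modified
  let list_keys := d1.keys
  let d2 := list_keys.foldl (fun d keys => if d.getD keys 0 ≤ 0 then d.erase keys else d) d1
  d2.items

-- ===== PORT B =====
-- B: counts = letter counter of word.lower(); then the dict comprehension
-- {k: v - counts.get(k,0) for k, v in hand.items() if v > counts.get(k,0)}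
-- (built as a dict from the filtered items; the source keys are distinct).
def update_hand_alt (hand : List (String × Int)) (word : String) : List (String × Int) :=
  let counts := (PySem.Str.lower word).toList.foldl
      (fun d ch => d.insert (String.mk [ch]) (d.getD (String.mk [ch]) 0 + 1)) PySem.Dict.empty
  (((PySem.Dict.ofList hand).items.filter (fun p => counts.getD p.1 0 < p.2)).foldl
      (fun d p => d.insert p.1 (p.2 - counts.getD p.1 0)) PySem.Dict.empty).items

-- ===== PRECONDITION & SPEC =====
def Spec_update_hand (hand : List (String × Int)) (word : String) (out : List (String × Int)) : Prop := out = update_hand_alt hand word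
instance (hand : List (String × Int)) (word : String) (out : List (String × Int)) : Decidable (Spec_update_hand hand word out) := by unfold Spec_update_hand; infer_instance

-- ===== CLAIM (what is proved, stated in full; the proofs are below) =====
def Claim_equal_update_hand : Prop := ∀ (hand : List (String × Int)) (word : String), Dom_update_hand hand word → Spec_update_hand hand word (update_hand hand word)

-- ===== LEMMAS AND PROOFS =====

-- the decrement loop of A, over the word's letters seen as 1-char String keys
def pvStepA (d : PySem.Dict String Int) (k : String) : PySem.Dict String Int :=
  if d.contains k then d.modify k 0 (fun v => v - 1) else d

lemma pvStepA_keys (d : PySem.Dict String Int) (k : String) : (pvStepA d k).keys = d.keys := by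
  unfold pvStepA
  split_ifs with h
  · rw [PySem.Dict.keys_modify, PySem.Dict.keys_insert_of_contains d _ h]
  · rfl

lemma pvDecLoop_keys (L : List String) (d : PySem.Dict String Int) :
    (L.foldl pvStepA d).keys = d.keys := by
  induction L generalizing d with
  | nil => rfl
  | cons x L ih => simpa [List.foldl_cons, pvStepA_keys] using ih (pvStepA d x)

lemma pvDecLoop_getD (L : List String) (d : PySem.Dict String Int) (k : String) :
    (L.foldl pvStepA d).getD k 0 =
      d.getD k 0 - (if d.contains k then (L.count k : Int) else 0) := by
  induction L generalizing d with
  | nil => simp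
  | cons x L ih =>
    rw [List.foldl_cons, ih (pvStepA d x)]
    unfold pvStepA
    by_cases hx : d.contains x = true
    · simp only [hx, if_true, PySem.Dict.getD_modify, PySem.Dict.contains_modify]
      by_cases hk : k = x
      · subst hk
        simp only [BEq.rfl, Bool.true_or, if_true, hx, List.count_cons_self]
        push_cast
        omega
      · have hb : (k == x) = false := by simp [hk]
        have hxk : ¬ x = k := fun h => hk h.symm
        have hc : List.count k (x :: L) = List.count k L := by simp [hxk]
        simp [hb, hc, hk]
    · simp only [Bool.not_eq_true] at hx
      simp only [hx, Bool.false_eq_true, if_false]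
      by_cases hk : (d.contains k) = true
      · have hne : k ≠ x := fun h => by rw [h] at hk; rw [hk] at hx; cases hx
        have hxk : ¬ x = k := fun h => hne h.symm
        have hc : List.count k (x :: L) = List.count k L := by simp [hxk]
        simp [hk, hc]
      · simp only [Bool.not_eq_true] at hk
        simp [hk]

-- the removal loop of A: erase every listed key whose current count is ≤ 0
def pvStepE (d : PySem.Dict String Int) (k : String) : PySem.Dict String Int :=
  if d.getD k 0 ≤ 0 then d.erase k else d

lemma pvEraseLoop_items (ks : List String) (d : PySem.Dict String Int)
    (hnd : d.keys.Nodup) :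
    (ks.foldl pvStepE d).items =
      d.items.filter (fun p => decide (p.1 ∉ ks) || decide (0 < p.2)) := by
  induction ks generalizing d with
  | nil => simp
  | cons x ks ih =>
    rw [List.foldl_cons]
    by_cases h : d.getD x 0 ≤ 0
    · rw [show pvStepE d x = d.erase x from by simp [pvStepE, h]]
      have hitems : (d.erase x).items = d.items.filter (fun p => !(p.1 == x)) := rfl
      have hnd' : (d.erase x).keys.Nodup := by
        have hsub : (d.erase x).keys.Sublist d.keys := by
          unfold PySem.Dict.keys
          rw [hitems]
          exact List.Sublist.map _ List.filter_sublist
        exact hnd.sublist hsub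
      rw [ih (d.erase x) hnd', hitems, List.filter_filter]
      apply List.filter_congr
      intro p hp
      by_cases hpx : p.1 = x
      · have hv : p.2 = d.getD x 0 := by
          have hmem : (p.1, p.2) ∈ d.items := by simpa using hp
          have := PySem.Dict.getD_of_mem_items d hmem hnd 0
          rw [hpx] at this
          omega
        have h2 : ¬ (0 : Int) < p.2 := by omega
        simp [hpx, h2]
      · have hb : (p.1 == x) = false := by simp [hpx]
        simp [List.mem_cons, hpx, hb]
    · rw [show pvStepE d x = d from by simp [pvStepE, h]]
      rw [ih d hnd]
      apply List.filter_congr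
      intro p hp
      by_cases hpx : p.1 = x
      · have hv : p.2 = d.getD x 0 := by
          have hmem : (p.1, p.2) ∈ d.items := by simpa using hp
          have := PySem.Dict.getD_of_mem_items d hmem hnd 0
          rw [hpx] at this
          omega
        have h2 : (0 : Int) < p.2 := by omega
        simp [h2]
      · simp [List.mem_cons, hpx]

theorem update_hand_spec : Claim_equal_update_hand := by
  intro hand word _
  unfold Spec_update_hand update_hand update_hand_alt
  dsimp only
  set w := (PySem.Str.lower word).toList with hw
  set d0 := PySem.Dict.ofList hand with hd0
  have hnd0 : d0.keys.Nodup := PySem.Dict.nodup_keys_ofList hand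
  set L : List String := w.map (fun c => String.mk [c]) with hL
  -- A's first loop, re-indexed over L
  have hfold1 : (w.foldl (fun d letters =>
      if d.contains (String.mk [letters]) then d.modify (String.mk [letters]) 0 (fun v => v - 1)
      else d) d0) = L.foldl pvStepA d0 := by
    rw [hL, List.foldl_map]; rfl
  rw [hfold1]
  set d1 := L.foldl pvStepA d0 with hd1
  have hkeys1 : d1.keys = d0.keys := pvDecLoop_keys L d0
  have hnd1 : d1.keys.Nodup := hkeys1 ▸ hnd0
  -- A's second loop
  have hfold2 : (d1.keys.foldl (fun d keys => if d.getD keys 0 ≤ 0 then d.erase keys else d) d1)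
      = d1.keys.foldl pvStepE d1 := rfl
  rw [hfold2, pvEraseLoop_items d1.keys d1 hnd1]
  -- every item's key is in d1.keys, so the membership disjunct drops
  have hA : d1.items.filter (fun p => decide (p.1 ∉ d1.keys) || decide (0 < p.2))
      = d1.items.filter (fun p => decide (0 < p.2)) := by
    apply List.filter_congr
    intro p hp
    have : p.1 ∈ d1.keys := List.mem_map.mpr ⟨p, hp, rfl⟩
    simp [this]
  rw [hA]
  -- characterise d1.items as a map over d0.items
  have hitems1 : d1.items = d0.items.map (fun p => (p.1, p.2 - (L.count p.1 : Int))) := by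
    rw [PySem.Dict.items_eq_map_keys d1 hnd1 0, hkeys1,
        PySem.Dict.items_eq_map_keys d0 hnd0 0, List.map_map]
    apply List.map_congr_left
    intro k hk
    have hck : d0.contains k = true := (PySem.Dict.contains_iff_mem_keys d0 k).mpr hk
    simp only [Function.comp]
    rw [hd1, pvDecLoop_getD L d0 k, hck]
    simp
  rw [hitems1, List.filter_map]
  -- B's counter gives exactly L.count
  have hcnt : ∀ k, (w.foldl
      (fun d ch => d.insert (String.mk [ch]) (d.getD (String.mk [ch]) 0 + 1))
      PySem.Dict.empty).getD k 0 = (L.count k : Int) := by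
    intro k
    have h1 := PySem.Dict.getD_foldl_insert_add_one L PySem.Dict.empty k
    rw [hL, List.foldl_map] at h1
    simpa [← hL] using h1
  simp only [hcnt]
  -- B's dict comprehension over distinct keys is filter + map
  have hsubkeys : ((d0.items.filter (fun p => (L.count p.1 : Int) < p.2)).map (·.1)).Nodup := by
    have : ((d0.items.filter (fun p => (L.count p.1 : Int) < p.2)).map (·.1)).Sublist
        (d0.items.map (·.1)) := List.Sublist.map _ List.filter_sublist
    exact (hnd0.sublist this)
  rw [PySem.Dict.items_foldl_insert_fresh
        (d0.items.filter (fun p => (L.count p.1 : Int) < p.2)) (·.1)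
        (fun p => p.2 - (L.count p.1 : Int)) PySem.Dict.empty
        (fun a _ => PySem.Dict.contains_empty (ν := Int) a) hsubkeys]
  simp only [PySem.Dict.empty, List.nil_append]
  have hpred : ((fun p : String × Int => decide (0 < p.2)) ∘
      (fun p : String × Int => (p.1, p.2 - (L.count p.1 : Int)))) =
      fun p : String × Int => decide ((L.count p.1 : Int) < p.2) := by
    funext p
    simp only [Function.comp, decide_eq_decide]
    omega
  rw [hpred]
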